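-- pv_equiv track=rewrite | github.com/JoelYYoung/SSE-Assessment | utils/tp_fp_statistic.py | merge_as_highest_level
-- ===== SOURCE A (Python) =====
-- def merge_as_highest_level(res_list):
--     loc_status_map = {}
--     for res in res_list:
--         loc = res[0]
--         if loc in loc_status_map:
--             loc_status_map[loc] = max(res[1], loc_status_map[loc])
--         else:
--             loc_status_map[loc] = res[1]
--     return loc_status_map
-- ===== SOURCE B (Python) =====
-- from collections import defaultdict
--
-- def merge_as_highest_level(res_list):
--     groups = defaultdict(list)
--     for loc, status in res_list:
--         groups[loc].append(status)
--     return {loc: max(vals) for loc, vals in groups.items()}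
-- ===== Notes on version B (the rewrite author's own statement) =====
-- stated objective: alternative
-- what changed: B groups all status values per location in one pass (defaultdict(list)) and then reduces each group with max in a comprehension, instead of maintaining a running maximum in the dict during the loop.
import Mathlib
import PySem

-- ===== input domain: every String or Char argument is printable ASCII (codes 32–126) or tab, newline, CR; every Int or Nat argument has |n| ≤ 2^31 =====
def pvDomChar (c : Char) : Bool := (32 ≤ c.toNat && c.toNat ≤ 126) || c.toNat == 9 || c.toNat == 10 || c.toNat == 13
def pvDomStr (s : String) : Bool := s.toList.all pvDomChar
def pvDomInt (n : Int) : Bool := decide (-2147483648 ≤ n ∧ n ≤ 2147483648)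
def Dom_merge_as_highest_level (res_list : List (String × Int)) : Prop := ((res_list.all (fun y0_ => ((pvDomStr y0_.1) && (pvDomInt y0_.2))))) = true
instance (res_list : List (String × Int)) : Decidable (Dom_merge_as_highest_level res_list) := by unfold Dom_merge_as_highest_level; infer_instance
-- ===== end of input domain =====

-- B groups all status values per location in one pass and then takes max of each group,
-- instead of A's running maximum kept in the dict; same O(n) cost, different decomposition.


-- ===== PORT A =====
-- running-max dict: loc_status_map[loc] = max(res[1], loc_status_map[loc]) on repeat keys
def merge_as_highest_level (res_list : List (String × Int)) : List (String × Int) :=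
  (res_list.foldl
    (fun d res =>
      if d.contains res.1 then
        d.insert res.1 (max res.2 (d.getD res.1 0))
      else
        d.insert res.1 res.2)
    PySem.Dict.empty).items

-- ===== PORT B =====
-- max(vals) on a nonempty Python list of ints, foldl over the tail from the head
def pvMaxList (vs : List Int) : Int :=
  match vs with
  | [] => 0
  | x :: xs => xs.foldl max x

-- grouping pass (defaultdict(list): groups[loc].append(status)), then reduction pass
def merge_as_highest_level_alt (res_list : List (String × Int)) : List (String × Int) :=
  ((res_list.foldl (fun g p => g.modify p.1 [] (· ++ [p.2])) PySem.Dict.empty).items).map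
    (fun kv => (kv.1, pvMaxList kv.2))

-- ===== PRECONDITION & SPEC =====
def Spec_merge_as_highest_level (res_list : List (String × Int)) (out : List (String × Int)) : Prop := out = merge_as_highest_level_alt res_list
instance (res_list : List (String × Int)) (out : List (String × Int)) : Decidable (Spec_merge_as_highest_level res_list out) := by unfold Spec_merge_as_highest_level; infer_instance

-- ===== CLAIM (what is proved, stated in full; the proofs are below) =====
def Claim_equal_merge_as_highest_level : Prop := ∀ (res_list : List (String × Int)), Dom_merge_as_highest_level res_list → Spec_merge_as_highest_level res_list (merge_as_highest_level res_list)

-- ===== LEMMAS AND PROOFS =====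

theorem pvMaxList_append_singleton (vs : List Int) (hvs : vs ≠ []) (v : Int) :
    pvMaxList (vs ++ [v]) = max v (pvMaxList vs) := by
  cases vs with
  | nil => exact absurd rfl hvs
  | cons x xs => simp [pvMaxList, List.foldl_append, max_comm]

-- the loop invariant: A's dict is the image of B's group dict under (k, vs) ↦ (k, max vs)
theorem pv_loop_eq (l : List (String × Int)) :
    ∀ (d : PySem.Dict String Int) (g : PySem.Dict String (List Int)),
    g.keys.Nodup →
    (∀ kv ∈ g.items, kv.2 ≠ ([] : List Int)) →
    d.items = g.items.map (fun kv => (kv.1, pvMaxList kv.2)) →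
    (l.foldl
      (fun d res =>
        if d.contains res.1 then
          d.insert res.1 (max res.2 (d.getD res.1 0))
        else
          d.insert res.1 res.2) d).items
    = ((l.foldl (fun g p => g.modify p.1 [] (· ++ [p.2])) g).items).map
        (fun kv => (kv.1, pvMaxList kv.2)) := by
  induction l with
  | nil => intro d g _ _ hitems; simpa using hitems
  | cons p rest ih =>
    intro d g hnd hne hitems
    obtain ⟨k, v⟩ := p
    have hkeys : d.keys = g.keys := by
      simp only [PySem.Dict.keys, hitems, List.map_map]; rfl
    have hdc : d.contains k = g.contains k := by
      simp [PySem.Dict.contains_eq_decide_mem_keys, hkeys]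
    have hdnd : d.keys.Nodup := by rw [hkeys]; exact hnd
    have hmod : g.modify k [] (· ++ [v]) = g.insert k (g.getD k [] ++ [v]) := rfl
    simp only [List.foldl_cons, hmod]
    by_cases hc : g.contains k = true
    · -- key already present in both dicts
      have hk_mem : k ∈ g.keys := (PySem.Dict.contains_iff_mem_keys g k).1 hc
      obtain ⟨vs, hkv_mem⟩ : ∃ x, (k, x) ∈ g.items := by
        simpa [PySem.Dict.keys] using hk_mem
      have hgetg : g.getD k [] = vs := PySem.Dict.getD_of_mem_items g hkv_mem hnd []
      have hvs_ne : vs ≠ [] := hne _ hkv_mem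
      have hd_mem : (k, pvMaxList vs) ∈ d.items := by
        rw [hitems]; exact List.mem_map.2 ⟨(k, vs), hkv_mem, rfl⟩
      have hgetd : d.getD k 0 = pvMaxList vs := PySem.Dict.getD_of_mem_items d hd_mem hdnd 0
      rw [if_pos (by rw [hdc]; exact hc)]
      apply ih
      · rw [PySem.Dict.keys_insert_of_contains g _ hc]; exact hnd
      · intro kv hkv
        rcases (PySem.Dict.mem_items_insert _ _ _ _).1 hkv with h | ⟨h, _⟩
        · subst h; simp
        · exact hne _ h
      · rw [PySem.Dict.items_insert_of_contains d _ (by rw [hdc]; exact hc),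
            PySem.Dict.items_insert_of_contains g _ hc, hitems,
            List.map_map, List.map_map]
        apply List.map_congr_left
        intro x hx
        obtain ⟨kx, vx⟩ := x
        by_cases hxk : kx = k
        · have h1 : g.get? k = some vx := by
            rw [hxk] at hx
            exact (PySem.Dict.get?_eq_some_iff_mem_items g k vx hnd).2 hx
          have h2 : g.get? k = some vs :=
            (PySem.Dict.get?_eq_some_iff_mem_items g k vs hnd).2 hkv_mem
          have hvx : vx = vs := Option.some.inj (h1.symm.trans h2)
          simp [hxk, hvx, hgetd, hgetg, pvMaxList_append_singleton vs hvs_ne v]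
        · simp [hxk]
    · -- fresh key: both dicts append
      rw [if_neg (by rw [hdc]; simpa using hc)]
      apply ih
      · rw [PySem.Dict.keys_insert_of_not_contains g _ (by simpa using hc)]
        have hk : k ∉ g.keys := fun h =>
          (by simpa using hc : ¬ g.contains k = true) ((PySem.Dict.contains_iff_mem_keys g k).2 h)
        exact (List.nodup_append).mpr ⟨hnd, List.nodup_singleton _, fun a ha b hb => by
          simp only [List.mem_singleton] at hb
          exact fun h => hk (by rw [h, hb] at ha; exact ha)⟩
      · intro kv hkv
        rcases (PySem.Dict.mem_items_insert _ _ _ _).1 hkv with h | ⟨h, _⟩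
        · subst h; simp
        · exact hne _ h
      · have hg0 : g.getD k [] = [] :=
          PySem.Dict.getD_of_not_contains g [] (by simpa using hc)
        rw [PySem.Dict.items_insert_of_not_contains g _ (by simpa using hc),
            PySem.Dict.items_insert_of_not_contains d _ (by rw [hdc]; simpa using hc), hitems, hg0]
        simp [pvMaxList]

-- ===== VERDICT (by name: the statement is the Claim_ definition above) =====
theorem merge_as_highest_level_spec : Claim_equal_merge_as_highest_level := by
  intro res_list _
  unfold Spec_merge_as_highest_level merge_as_highest_level merge_as_highest_level_alt
  exact pv_loop_eq res_list PySem.Dict.empty PySem.Dict.empty (by simp) (fun kv h => absurd h List.not_mem_nil) rfl
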